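-- pv_equiv track=rewrite | github.com/miliar/Code_Jam_Webscraper | solutions_python/Problem_178/3746.py | trouveNombreMoinsFin
-- ===== SOURCE A (Python) =====
-- def trouveNombreMoinsFin(chaine):
--     l=len(chaine)
--     c=0
--     for i in range(l-1,-1,-1):
--         if chaine[i]=='+':
--             return c
--         c+=1
--     return c
-- ===== SOURCE B (Python) =====
-- def trouveNombreMoinsFin(chaine):
--     c = 0
--     for ch in chaine:
--         c = 0 if ch == '+' else c + 1
--     return c
-- ===== Notes on version B (the rewrite author's own statement) =====
-- stated objective: alternative
-- what changed: Replaces A's backwards indexed scan with early return (chaine[i] lookups over range(l-1,-1,-1)) by a single forward pass over the characters that resets a running counter to 0 at every '+', so the final accumulator is the count of trailing characters.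
import Mathlib
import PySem

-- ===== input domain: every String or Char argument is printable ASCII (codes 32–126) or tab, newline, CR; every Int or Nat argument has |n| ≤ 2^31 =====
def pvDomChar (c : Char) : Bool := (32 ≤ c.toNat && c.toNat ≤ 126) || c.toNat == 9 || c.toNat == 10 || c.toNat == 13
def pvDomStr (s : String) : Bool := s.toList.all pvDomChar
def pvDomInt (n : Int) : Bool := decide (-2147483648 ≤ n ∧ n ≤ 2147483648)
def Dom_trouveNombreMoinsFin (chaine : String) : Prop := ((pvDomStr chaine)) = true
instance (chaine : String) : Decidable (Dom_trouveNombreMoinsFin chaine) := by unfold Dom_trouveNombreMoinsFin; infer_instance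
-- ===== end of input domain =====

-- B replaces A's backwards indexed scan (early return at the last '+') by a single forward
-- pass resetting a counter to 0 at each '+' (alternative decomposition; same cost).

-- ===== PORT A =====
-- the for-loop over range(l-1,-1,-1) with early return, as structural recursion over the index list
def pvLoopA : List Int → List Char → Int → Int
  | [], _, c => c
  | i :: rest, cs, c =>
    if PySem.List.pyGet? cs i = some '+' then c else pvLoopA rest cs (c + 1)

def trouveNombreMoinsFin (chaine : String) : Int :=
  let cs := chaine.toList
  pvLoopA (PySem.List.pyRange ((cs.length : Int) - 1) (-1) (-1)) cs 0

-- ===== PORT B =====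
-- forward fold: counter resets to 0 on '+', else increments
def trouveNombreMoinsFin_alt (chaine : String) : Int :=
  chaine.toList.foldl (fun c ch => if ch = '+' then 0 else c + 1) 0

-- ===== PRECONDITION & SPEC =====
def Spec_trouveNombreMoinsFin (chaine : String) (out : Int) : Prop := out = trouveNombreMoinsFin_alt chaine
instance (chaine : String) (out : Int) : Decidable (Spec_trouveNombreMoinsFin chaine out) := by unfold Spec_trouveNombreMoinsFin; infer_instance

-- ===== CLAIM (what is proved, stated in full; the proofs are below) =====
def Claim_equal_trouveNombreMoinsFin : Prop := ∀ (chaine : String), Dom_trouveNombreMoinsFin chaine → Spec_trouveNombreMoinsFin chaine (trouveNombreMoinsFin chaine)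

-- ===== LEMMAS AND PROOFS =====

-- B's fold in closed form: the index of the first '+' in the reversed character list
theorem foldB_eq (cs : List Char) (c : Int) :
    cs.foldl (fun c ch => if ch = '+' then 0 else c + 1) c
      = if '+' ∈ cs then (cs.reverse.idxOf '+' : Int) else c + cs.length := by
  induction cs using List.reverseRecOn generalizing c with
  | nil => simp
  | append_singleton ds a ih =>
    rw [List.foldl_append]
    simp only [List.foldl_cons, List.foldl_nil, List.reverse_append, List.reverse_singleton,
      List.singleton_append, List.mem_append, List.mem_singleton]
    by_cases ha : a = '+'
    · rw [if_pos ha, if_pos (Or.inr ha.symm), ha, List.idxOf_cons_self]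
      simp
    · rw [if_neg ha, ih, List.idxOf_cons,
        show (a == '+') = false from by simpa using ha]
      simp only [Bool.cond_false]
      by_cases hm : '+' ∈ ds
      · rw [if_pos hm, if_pos (Or.inl hm)]
        have hm' : '+' ∈ ds.reverse := by simpa using hm
        push_cast
        ring
      · rw [if_neg hm, if_neg (by simp [hm]; exact fun h => ha h.symm)]
        simp only [List.length_append, List.length_cons, List.length_nil]
        push_cast
        ring

-- A's loop invariant: scanning indices n-1 … 0 of cs counts the reversed prefix up to the first '+'
theorem loopA_eq (cs : List Char) :
    ∀ (n : Nat) (c : Int), n ≤ cs.length →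
      pvLoopA (PySem.List.pyRange ((n : Int) - 1) (-1) (-1)) cs c
        = c + ((cs.take n).reverse.idxOf '+' : Int) := by
  intro n
  induction n with
  | zero =>
    intro c _
    rw [PySem.List.pyRange_neg_one_eq_nil (by norm_num)]
    simp [pvLoopA]
  | succ n ih =>
    intro c hn
    have hlt : n < cs.length := hn
    have hcast : (((n + 1 : Nat) : Int)) - 1 = (n : Int) := by push_cast; ring
    rw [hcast, PySem.List.pyRange_neg_one_cons (by omega)]
    have hget : PySem.List.pyGet? cs (n : Int) = some cs[n] := by
      simp [PySem.List.pyGet?, PySem.List.pyIdx?, hlt]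
    have hrev : (cs.take (n + 1)).reverse = cs[n] :: (cs.take n).reverse := by
      have htake : cs.take (n + 1) = cs.take n ++ [cs[n]] := by
        rw [List.take_add_one, List.getElem?_eq_getElem hlt]; rfl
      rw [htake]; simp
    by_cases hc : cs[n] = '+'
    · simp only [pvLoopA]
      rw [if_pos (by simp [hget, hc]), hrev, hc, List.idxOf_cons]
      simp
    · simp only [pvLoopA]
      rw [if_neg (by simp [hget, hc]), ih (c + 1) (by omega), hrev, List.idxOf_cons,
          show (cs[n] == '+') = false from by simpa using hc]
      simp only [Bool.cond_false]
      push_cast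
      ring

-- ===== VERDICT (by name: the statement is the Claim_ definition above) =====
theorem trouveNombreMoinsFin_spec : Claim_equal_trouveNombreMoinsFin := by
  intro chaine _
  unfold Spec_trouveNombreMoinsFin trouveNombreMoinsFin trouveNombreMoinsFin_alt
  rw [foldB_eq]
  have h := loopA_eq chaine.toList chaine.toList.length 0 le_rfl
  rw [List.take_length] at h
  by_cases hm : '+' ∈ chaine.toList
  · rw [if_pos hm]; simpa using h
  · rw [if_neg hm]
    have h' : '+' ∉ chaine.toList.reverse := by simpa using hm
    rw [List.idxOf_eq_length_iff.mpr h'] at h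
    simpa using h
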